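/- GENERATED by tools/from_farm_form.py from farm/worked/log/Proof.lean (a worked proof of the farm's unit `log`,
   accepted by the verdict) — do not edit. -/
import Asan.CheckWalk
import ProgX.Base.Spec.Units.log

open X86 X86.User Asan ProgX.Base

set_option maxRecDepth 4000
set_option maxHeartbeats 4000000

/-- `log(x)` (libm.c:97-141) satisfies its contract: `push rbx`, branches on float compares and on the bits of `x`, two call
sites of `two_to` (0x102967: the subnormal scaling, libm.c:116; 0x102aa8: the `-inf` of `log(0)`, libm.c:106), straight-line
SSE code over constants of `.rodata`, `pop rbx ; ret`. Seven `ret` paths; the only stores are the push and the two return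
addresses, so no shadow byte is written. -/
theorem ProgX.Base.Spec.Proved.log_ok : ProgX.Base.Spec.log.Statement := by
  intro Lay hLay μ hμ u₀ hcode h_two_to others frames u ret he hpre
  v_entry he
  have hsp := hpre.rsp
  -- the callee's contract, instantiated: the walker finds it at both call sites
  have htt := h_two_to others frames
  -- 0x102920 (libm.c:97): one walk, to every `ret` not behind a call and to the return of each call of `two_to`
  u_walk hcode [hμ.vendor] span [ProgX.Base.L.textLo, ProgX.Base.L.textHi] side (v_side)
  · -- 0x102aa8 (libm.c:106) call_inv: DF and the MXCSR masks at the entry of `two_to(1023)`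
    v_inv
  · -- 0x102aa8 (libm.c:106) the precondition of `two_to`: the shadow layer, with the clean stack ending 16 bytes lower
    have hun : ShadowUntouched u.mem s_102aa8.mem := by v_untouched
    refine ⟨?_, hpre.offText⟩
    rw [w_rsp]
    refine (hpre.inv.untouched hun).lower ?_ ?_ ?_
    · u_omega
    · u_omega
    · u_omega
  · -- 0x102967 (libm.c:116) call_inv: DF and the MXCSR masks at the entry of `two_to(54)`
    v_inv
  · -- 0x102967 (libm.c:116) the precondition of `two_to`: the shadow layer, with the clean stack ending 16 bytes lower
    have hun : ShadowUntouched u.mem s_102967.mem := by v_untouched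
    refine ⟨?_, hpre.offText⟩
    rw [w_rsp]
    refine (hpre.inv.untouched hun).lower ?_ ?_ ?_
    · u_omega
    · u_omega
    · u_omega
  · -- 0x102a9a: the NaN path (libm.c:108), reached by `jp` at 0x102a9f
    refine ReachVia.done ?_
    v_returned
    show ShadowUntouched u.mem s_102a9a.mem
    v_untouched
  · -- 0x102a9a: the NaN path (libm.c:108), reached by `jne` at 0x102aa1
    refine ReachVia.done ?_
    v_returned
    show ShadowUntouched u.mem s_102a9a.mem
    v_untouched
  · -- 0x102aad (libm.c:106): after the return of `two_to(1023)`. What its contract says, restated for the second walk: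
    -- the code span, DF and the MXCSR masks, the two stack slots `pop rbx ; ret` read, the footprint, the shadow
    simp only [X86.User.Spec.footprint, vspec, w_rsp_102aa8] at w_same
    have w_eq := ProgX.Base.conv_code_eqOn w_code
    have hdf : s_102aa8r.flags .df = false := (show abiInv _ from w_inv).1
    have hmxr : s_102aa8r.mxcsr &&& 0x1F80 = 0x1F80 := (show abiInv _ from w_inv).2
    have hsse : SseOK s_102aa8r := ⟨hmxr⟩
    have hun0 : ShadowUntouched u.mem s_102aa8.mem := by v_untouched
    have ht1 : UInt64.ofNat (s_102aa8.mem.readLE (u.reg .rsp - 8) 8) = u.reg .rbx := by u_resolve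
    have ht0 : UInt64.ofNat (s_102aa8.mem.readLE (u.reg .rsp) 8) = ret := by u_resolve
    have hs1 : UInt64.ofNat (s_102aa8r.mem.readLE (u.reg .rsp - 8) 8) = u.reg .rbx := by u_frame ht1
    have hs0 : UInt64.ofNat (s_102aa8r.mem.readLE (u.reg .rsp) 8) = ret := by u_frame ht0
    have hun : ShadowUntouched u.mem s_102aa8r.mem := hun0.trans w_post
    -- (stated AFTER the slots: `u_frame` takes the newest `SameExcept` about this memory, and needs `w_same` there)
    have hsame : Mem.SameExcept [⟨(u.reg .rsp).toNat - 16, (u.reg .rsp).toNat⟩] u.mem s_102aa8r.mem := by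
      u_same
    u_walk hcode [hμ.vendor] span [ProgX.Base.L.textLo, ProgX.Base.L.textHi] side (v_side)
    -- 0x102a9a: `addsd ; xorpd [16-byte sign mask] ; jmp ; pop rbx ; ret`
    refine ReachVia.done ?_
    v_returned
    show ShadowUntouched u.mem s_102a9a.mem
    rw [w_mem]
    exact hun
  · -- 0x102a9a: `return x` for +inf / NaN bits (libm.c:112), reached by `jb` at 0x102949
    refine ReachVia.done ?_
    v_returned
    show ShadowUntouched u.mem s_102a9a.mem
    v_untouched
  · -- 0x102a9a: a normal `x` (libm.c:114, `e = 0`), `m ≤ √2` (`jbe` at 0x1029b5 taken)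
    refine ReachVia.done ?_
    v_returned
    show ShadowUntouched u.mem s_102a9a.mem
    v_untouched
  · -- 0x102a9a: a normal `x` (libm.c:114, `e = 0`), `m > √2` (libm.c:123-124)
    refine ReachVia.done ?_
    v_returned
    show ShadowUntouched u.mem s_102a9a.mem
    v_untouched
  · -- 0x10296c (libm.c:116): after the return of `two_to(54)` (a subnormal `x`). The same restatement as at 0x102aad
    simp only [X86.User.Spec.footprint, vspec, w_rsp_102967] at w_same
    have w_eq := ProgX.Base.conv_code_eqOn w_code
    have hdf : s_102967r.flags .df = false := (show abiInv _ from w_inv).1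
    -- (the mask fact itself, not only `SseOK`: the first SSE arithmetic, `mulsd` at 0x102971, comes one step later)
    have hmxr : s_102967r.mxcsr &&& 0x1F80 = 0x1F80 := (show abiInv _ from w_inv).2
    have hsse : SseOK s_102967r := ⟨hmxr⟩
    have hun0 : ShadowUntouched u.mem s_102967.mem := by v_untouched
    have ht1 : UInt64.ofNat (s_102967.mem.readLE (u.reg .rsp - 8) 8) = u.reg .rbx := by u_resolve
    have ht0 : UInt64.ofNat (s_102967.mem.readLE (u.reg .rsp) 8) = ret := by u_resolve
    have hs1 : UInt64.ofNat (s_102967r.mem.readLE (u.reg .rsp - 8) 8) = u.reg .rbx := by u_frame ht1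
    have hs0 : UInt64.ofNat (s_102967r.mem.readLE (u.reg .rsp) 8) = ret := by u_frame ht0
    have hun : ShadowUntouched u.mem s_102967r.mem := hun0.trans w_post
    have hsame : Mem.SameExcept [⟨(u.reg .rsp).toNat - 16, (u.reg .rsp).toNat⟩] u.mem s_102967r.mem := by
      u_same
    -- 0x10296c … 0x102a9a (libm.c:116-141): the rest of the function, both arms of `if (m > √2)`
    u_walk hcode [hμ.vendor] span [ProgX.Base.L.textLo, ProgX.Base.L.textHi] side (v_side)
    · -- 0x102a9a: `m ≤ √2` (`jbe` at 0x1029b5 taken)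
      refine ReachVia.done ?_
      v_returned
      show ShadowUntouched u.mem s_102a9a.mem
      rw [w_mem]
      exact hun
    · -- 0x102a9a: `m > √2` (libm.c:123-124)
      refine ReachVia.done ?_
      v_returned
      show ShadowUntouched u.mem s_102a9a.mem
      rw [w_mem]
      exact hun
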